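-- pv_equiv track=rewrite | github.com/cristian39395110/radar | Generador/video-analize/main.py | delete_static_pics
-- ===== SOURCE A (Python) =====
-- def delete_static_pics(pics):
--     coords_count = {}
--     for pic in pics:
--         coords = str(pic["coordinates"])
--         if coords in coords_count:
--             coords_count[coords].append(pic["pic"])
--         else:
--             coords_count[coords] = [pic["pic"]]
--     filter_pics = []
--     for key in coords_count:
--         if len(coords_count[key]) == 1:
--             filter_pics.append(*coords_count[key])
--     return filter_pics
-- ===== SOURCE B (Python) =====
-- def delete_static_pics(pics):
--     # Index-free of dicts: materialize (coords, pic) pairs once, then keep a pair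
--     # iff no OTHER position carries the same coordinate string (quadratic scan).
--     items = [(str(p["coordinates"]), p["pic"]) for p in pics]
--     return [v for i, (c, v) in enumerate(items)
--             if all(j == i or items[j][0] != c for j in range(len(items)))]
-- ===== Notes on version B (the rewrite author's own statement) =====
-- stated objective: alternative
-- what changed: B drops A's grouping dict entirely: it materializes the (coords, pic) pairs and keeps a pair iff a quadratic all-other-positions scan finds no second occurrence of its coordinate, preserving input order.
import Mathlib
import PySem

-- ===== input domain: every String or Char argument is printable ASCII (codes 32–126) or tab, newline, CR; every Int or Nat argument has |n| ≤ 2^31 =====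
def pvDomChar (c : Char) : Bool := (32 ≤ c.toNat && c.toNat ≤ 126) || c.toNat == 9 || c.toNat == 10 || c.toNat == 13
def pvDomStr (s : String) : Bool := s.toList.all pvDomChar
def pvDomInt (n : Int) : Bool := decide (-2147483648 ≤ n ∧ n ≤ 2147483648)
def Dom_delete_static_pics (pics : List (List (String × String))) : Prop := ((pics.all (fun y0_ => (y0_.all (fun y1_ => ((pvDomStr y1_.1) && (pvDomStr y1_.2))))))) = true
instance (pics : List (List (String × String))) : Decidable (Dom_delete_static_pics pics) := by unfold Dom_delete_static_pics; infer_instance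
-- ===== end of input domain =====

-- Header: B replaces A's grouping dict by a dict-free quadratic scan — it keeps a
-- (coords, pic) pair iff no other position holds the same coordinate string;
-- objective: alternative (structurally different, not faster).

-- ===== PORT A =====
def delete_static_pics (pics : List (List (String × String))) : List String :=
  let coords_count : PySem.Dict String (List String) := pics.foldl
    (fun d pic =>
      let coords := ((PySem.Dict.mk pic).get? "coordinates").getD ""
      if d.contains coords then
        d.modify coords [] (fun l => l ++ [((PySem.Dict.mk pic).get? "pic").getD ""])
      else
        d.insert coords [((PySem.Dict.mk pic).get? "pic").getD ""])
    PySem.Dict.empty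
  coords_count.items.foldl (fun acc kv => if kv.2.length == 1 then acc ++ kv.2 else acc) []

-- ===== PORT B =====
def delete_static_pics_alt (pics : List (List (String × String))) : List String :=
  let items := pics.map (fun p =>
    (((PySem.Dict.mk p).get? "coordinates").getD "", ((PySem.Dict.mk p).get? "pic").getD ""))
  ((PySem.List.enumerate items).filter (fun iv =>
      (PySem.List.pyRange 0 (items.length : Int) 1).all (fun j =>
        decide (j = iv.1) || decide ((PySem.List.pyGetD items j ("", "")).1 ≠ iv.2.1)))).map
    (fun iv => iv.2.2)

-- ===== PRECONDITION & SPEC =====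
-- Pre_ excludes exactly the pics lacking a "coordinates" or a "pic" key: Python A raises KeyError there.
def Pre_delete_static_pics (pics : List (List (String × String))) : Prop :=
  (pics.all (fun pic => ((PySem.Dict.mk pic).get? "coordinates").isSome
                     && ((PySem.Dict.mk pic).get? "pic").isSome)) = true
instance (pics : List (List (String × String))) : Decidable (Pre_delete_static_pics pics) := by
  unfold Pre_delete_static_pics; infer_instance

def pvWitness_delete_static_pics : (List (List (String × String))) :=
  [[("coordinates", "(1, 2)"), ("pic", "a.jpg")], [("coordinates", "(3, 4)"), ("pic", "b.jpg")]]

def Spec_delete_static_pics (pics : List (List (String × String))) (out : List String) : Prop := out = delete_static_pics_alt pics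
instance (pics : List (List (String × String))) (out : List String) : Decidable (Spec_delete_static_pics pics out) := by unfold Spec_delete_static_pics; infer_instance

-- ===== CLAIM (what is proved, stated in full; the proofs are below) =====
def Claim_equal_delete_static_pics : Prop := ∀ (pics : List (List (String × String))), Dom_delete_static_pics pics → Pre_delete_static_pics pics → Spec_delete_static_pics pics (delete_static_pics pics)

-- ===== LEMMAS AND PROOFS =====

-- the (coords, pic) pair a pic contributes
def pvKV (pic : List (String × String)) : String × String :=
  (((PySem.Dict.mk pic).get? "coordinates").getD "", ((PySem.Dict.mk pic).get? "pic").getD "")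

-- A's grouping step, at pair level
def pvGrpStep (d : PySem.Dict String (List String)) (p : String × String) : PySem.Dict String (List String) :=
  if d.contains p.1 then d.modify p.1 [] (fun l => l ++ [p.2]) else d.insert p.1 [p.2]

def pvGrp (ps : List (String × String)) : PySem.Dict String (List String) :=
  ps.foldl pvGrpStep PySem.Dict.empty

-- the common reference value: pairs whose coordinate occurs exactly once, in input order
def pvSpecList (ps : List (String × String)) : List String :=
  (ps.filter (fun q => (ps.map Prod.fst).count q.1 == 1)).map Prod.snd

lemma pvFind?_beq_self {l : List String} {x : String} (h : x ∈ l) :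
    l.find? (fun k => k == x) = some x := by
  induction l with
  | nil => cases h
  | cons a t ih =>
    by_cases hax : a = x
    · subst hax; simp [List.find?]
    · have hb : (a == x) = false := by simp [hax]
      have hx : x ∈ t := by cases h with
        | head => exact absurd rfl hax
        | tail _ h' => exact h'
      simp [List.find?, hb, ih hx]

lemma pvOfList_contains (l : List String) (x : String) :
    (PySem.Set.ofList l).contains x = decide (x ∈ l) := by
  simp only [PySem.Set.contains]
  by_cases hx : x ∈ l
  · simp [hx, PySem.Set.mem_ofList]
  · simp [hx, PySem.Set.mem_ofList]

lemma pvDedup_append (l : List String) (x : String) :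
    PySem.List.dedup (l ++ [x]) =
      if x ∈ l then PySem.List.dedup l else PySem.List.dedup l ++ [x] := by
  have h1 : PySem.List.dedup (l ++ [x]) = PySem.Set.add (PySem.Set.ofList l) x := by
    simp [PySem.List.dedup, PySem.Set.ofList, List.foldl_append]
  rw [h1, PySem.Set.add, pvOfList_contains]
  by_cases hx : x ∈ l
  · rw [if_pos (by simp [hx]), if_pos hx]; rfl
  · rw [if_neg (by simp [hx]), if_neg hx]; rfl

-- the items of A's grouping dict: first-occurrence key order, grouped values
lemma pvGrp_items (ps : List (String × String)) :
    (pvGrp ps).items =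
      (PySem.List.dedup (ps.map Prod.fst)).map
        (fun k => (k, (ps.filter (fun q => q.1 == k)).map Prod.snd)) := by
  induction ps using List.reverseRecOn with
  | nil => simp [pvGrp, PySem.List.dedup, PySem.Set.ofList, PySem.Set.empty, PySem.Dict.empty]
  | append_singleton ps p ih =>
    have hstep : pvGrp (ps ++ [p]) = pvGrpStep (pvGrp ps) p := by
      simp [pvGrp, List.foldl_append]
    have hcont : (pvGrp ps).contains p.1 = decide (p.1 ∈ ps.map Prod.fst) := by
      simp only [PySem.Dict.contains, ih, List.any_map]
      rw [show ((fun (q : String × List String) => q.1 == p.1) ∘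
            (fun k => (k, (ps.filter (fun q => q.1 == k)).map Prod.snd)))
          = (fun (k : String) => k == p.1) from rfl]
      by_cases hm : p.1 ∈ ps.map Prod.fst
      · simp only [hm, decide_true]
        rw [List.any_eq_true]
        exact ⟨p.1, (PySem.List.mem_dedup _ _).mpr hm, by simp⟩
      · simp only [hm, decide_false, List.any_eq_false]
        intro k hk h
        exact hm (eq_of_beq h ▸ (PySem.List.mem_dedup _ _).mp hk)
    rw [hstep, pvGrpStep, hcont]
    simp only [List.map_append, List.map_cons, List.map_nil]
    by_cases hmem : p.1 ∈ ps.map Prod.fst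
    · -- key already present: in-place update of its group
      have hmd : p.1 ∈ PySem.List.dedup (ps.map Prod.fst) := (PySem.List.mem_dedup _ _).mpr hmem
      have hget : (pvGrp ps).getD p.1 [] = (ps.filter (fun q => q.1 == p.1)).map Prod.snd := by
        simp only [PySem.Dict.getD, PySem.Dict.get?, ih, List.find?_map]
        rw [show ((fun (q : String × List String) => q.1 == p.1) ∘
              (fun k => (k, (ps.filter (fun q => q.1 == k)).map Prod.snd)))
            = (fun (k : String) => k == p.1) from rfl,
          pvFind?_beq_self hmd]
        rfl
      rw [if_pos (by simp [hmem])]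
      rw [PySem.Dict.modify, PySem.Dict.insert, if_pos (by rw [hcont]; simp [hmem])]
      simp only [] at ih ⊢
      rw [show ((pvGrp ps).1 : List (String × List String)) = (pvGrp ps).items from rfl, ih,
        List.map_map, pvDedup_append, if_pos hmem, hget]
      apply List.map_congr_left
      intro k _
      by_cases hkp : k = p.1
      · subst hkp
        simp [Function.comp, List.filter_append]
      · have hb : (k == p.1) = false := by simp [hkp]
        have hb2 : (p.1 == k) = false := by simp [Ne.symm hkp]
        simp [Function.comp, hb, List.filter_append, hb2]
    · -- fresh key: appended at the end
      rw [if_neg (by simp [hmem])]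
      rw [PySem.Dict.insert, if_neg (by rw [hcont]; simp [hmem])]
      simp only [] at ih ⊢
      rw [show ((pvGrp ps).1 : List (String × List String)) = (pvGrp ps).items from rfl, ih,
        pvDedup_append, if_neg hmem, List.map_append]
      congr 1
      · apply List.map_congr_left
        intro k hk
        have hkmem : k ∈ ps.map Prod.fst := (PySem.List.mem_dedup _ _).mp hk
        have hkp : ¬ (p.1 = k) := fun h => hmem (h ▸ hkmem)
        have hb2 : (p.1 == k) = false := by simp [hkp]
        simp [List.filter_append, hb2]
      · have hnil : ps.filter (fun q => q.1 == p.1) = [] := by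
          rw [List.filter_eq_nil_iff]
          intro q hq hq1
          exact hmem (List.mem_map.mpr ⟨q, hq, by simpa using hq1⟩)
        simp [List.filter_append, hnil]

-- the key combinatorial fact: scanning the grouped dict for singleton groups, in
-- first-occurrence key order, is the same as filtering the pairs in input order
lemma pvKeyLemma (ps : List (String × String)) (c : String → Nat) :
    (PySem.List.dedup (ps.map Prod.fst)).flatMap
      (fun k => if (ps.map Prod.fst).count k + c k == 1
                then (ps.filter (fun q => q.1 == k)).map Prod.snd else [])
    = (ps.filter (fun q => (ps.map Prod.fst).count q.1 + c q.1 == 1)).map Prod.snd := by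
  induction ps using List.reverseRecOn generalizing c with
  | nil => simp [PySem.List.dedup, PySem.Set.ofList, PySem.Set.empty]
  | append_singleton ps p ih =>
    have ihc := ih (fun k => (if p.1 = k then 1 else 0) + c k)
    simp only [List.map_append, List.map_cons, List.map_nil]
    have hcnt : ∀ k, (ps.map Prod.fst ++ [p.1]).count k
        = (ps.map Prod.fst).count k + (if p.1 = k then 1 else 0) := by
      intro k
      rw [List.count_append, List.count_singleton]
      congr 1
      simp [beq_iff_eq]
    simp only [hcnt, Nat.add_assoc]
    by_cases hmem : p.1 ∈ ps.map Prod.fst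
    · -- the appended pair's coordinate already occurs: all its pairs are dropped on both sides
      have h1 : 1 ≤ (ps.map Prod.fst).count p.1 := List.count_pos_iff.mpr hmem
      rw [pvDedup_append, if_pos hmem, List.filter_append]
      have htail : ([p].filter (fun q =>
          (ps.map Prod.fst).count q.1 + ((if p.1 = q.1 then 1 else 0) + c q.1) == 1)) = [] := by
        simp only [List.filter_cons, List.filter_nil]
        rw [if_neg (by simp; omega)]
      rw [htail, List.append_nil, ← ihc]
      apply List.flatMap_congr
      intro k hk
      by_cases hkp : p.1 = k
      · subst hkp
        rw [if_neg (by simp; omega), if_neg (by simp; omega)]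
      · have hb2 : (p.1 == k) = false := by simp [hkp]
        rw [show ((ps ++ [p]).filter (fun q => q.1 == k)) = ps.filter (fun q => q.1 == k) from by
          simp [List.filter_append, hb2]]
    · -- fresh coordinate: appended to the key order and to the kept pairs alike
      have hc0 : (ps.map Prod.fst).count p.1 = 0 := List.count_eq_zero.mpr hmem
      have hfil : ps.filter (fun q => q.1 == p.1) = [] := by
        rw [List.filter_eq_nil_iff]
        intro q hq hq1
        exact hmem (List.mem_map.mpr ⟨q, hq, by simpa using hq1⟩)
      rw [pvDedup_append, if_neg hmem, List.flatMap_append, List.filter_append, List.map_append]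
      congr 1
      · rw [← ihc]
        apply List.flatMap_congr
        intro k hk
        have hkp : ¬ (p.1 = k) := fun h => hmem (h ▸ (PySem.List.mem_dedup _ _).mp hk)
        have hb2 : (p.1 == k) = false := by simp [hkp]
        rw [show ((ps ++ [p]).filter (fun q => q.1 == k)) = ps.filter (fun q => q.1 == k) from by
          simp [List.filter_append, hb2]]
      · -- the new key's own group: a singleton iff its total count is one
        simp only [List.flatMap_cons, List.flatMap_nil, List.append_nil,
          List.filter_cons, List.filter_nil, hc0, Nat.zero_add]
        rw [show ((ps ++ [p]).filter (fun q => q.1 == p.1)) = [p] from by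
          simp [List.filter_append, hfil]]
        by_cases h1 : c p.1 = 0 <;> simp [h1]

-- countP over a list equals the number of positions carrying a matching element
lemma pvCountP_range (l : List (String × String)) (d : String × String)
    (p : String × String → Bool) :
    l.countP p = ((List.range l.length).filter (fun j => p (l.getD j d))).length := by
  induction l using List.reverseRecOn with
  | nil => simp
  | append_singleton l x ih =>
    rw [List.countP_append, List.length_append, List.length_singleton, List.range_succ,
      List.filter_append, List.length_append, ih]
    congr 1
    · congr 1
      apply List.filter_congr
      intro j hj
      have hj' : j < l.length := List.mem_range.mp hj
      rw [List.getD_append _ _ _ _ hj']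
    · have hx : (l ++ [x])[l.length]? = some x := by
        rw [List.getElem?_append_right le_rfl]; simp
      by_cases hpx : p x = true <;> simp [List.getD, hpx]

-- membership in enumerate gives the index and the element at it
lemma pvMemEnum (l : List (String × String)) (s : Int) (iv : Int × (String × String))
    (h : iv ∈ PySem.List.enumerate l s) :
    ∃ k : Nat, iv.1 = s + k ∧ k < l.length ∧ l.getD k ("", "") = iv.2 := by
  induction l generalizing s with
  | nil => simp [PySem.List.enumerate_nil] at h
  | cons x t ih =>
    rw [PySem.List.enumerate_cons, List.mem_cons] at h
    cases h with
    | inl h0 => exact ⟨0, by simp [h0]⟩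
    | inr h1 =>
      obtain ⟨k, hk1, hk2, hk3⟩ := ih (s + 1) h1
      exact ⟨k + 1, by push_cast at hk1 ⊢; omega, by simpa using hk2, by simpa using hk3⟩

-- filtering enumerate on a predicate of the element, then projecting, ignores the indices
lemma pvEnumFilter (l : List (String × String)) (s : Int) (P : String × String → Bool) :
    ((PySem.List.enumerate l s).filter (fun iv => P iv.2)).map (fun iv => iv.2.2)
      = (l.filter P).map Prod.snd := by
  induction l generalizing s with
  | nil => simp [PySem.List.enumerate_nil]
  | cons x t ih =>
    rw [PySem.List.enumerate_cons]
    by_cases hP : P x = true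
    · simp [hP, ih]
    · simp [hP, ih]

-- B's all-other-positions test is exactly "this coordinate occurs once"
lemma pvAllIff (l : List (String × String)) (k : Nat) (hk : k < l.length) :
    ((List.range l.length).all
        (fun t => decide (t = k) || decide ((l.getD t ("", "")).1 ≠ (l.getD k ("", "")).1)))
      = ((l.map Prod.fst).count (l.getD k ("", "")).1 == 1) := by
  set c := (l.getD k ("", "")).1 with hc
  have hcount : (l.map Prod.fst).count c
      = ((List.range l.length).filter (fun j => (l.getD j ("", "")).1 == c)).length := by
    rw [List.count_eq_countP, List.countP_map]
    exact pvCountP_range l ("", "") (fun q => q.1 == c)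
  set F := (List.range l.length).filter (fun j => (l.getD j ("", "")).1 == c) with hF
  have hkF : k ∈ F := by
    rw [hF, List.mem_filter]
    exact ⟨List.mem_range.mpr hk, by simp [hc, List.getD]⟩
  have hnd : F.Nodup := List.nodup_range.filter _
  by_cases hall : ∀ t ∈ List.range l.length, t = k ∨ (l.getD t ("", "")).1 ≠ c
  · -- F = [k]
    have hsub : ∀ j ∈ F, j = k := by
      intro j hj
      rw [hF, List.mem_filter] at hj
      rcases hall j hj.1 with h | h
      · exact h
      · exact absurd (by simpa using hj.2) h
    have hlen : F.length = 1 := by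
      rcases F with _ | ⟨a, rest⟩
      · cases hkF
      · rcases rest with _ | ⟨b, rest'⟩
        · rfl
        · exfalso
          have ha := hsub a (by simp)
          have hb := hsub b (by simp)
          simp [ha, hb] at hnd
    rw [show ((List.range l.length).all
        (fun t => decide (t = k) || decide ((l.getD t ("", "")).1 ≠ c))) = true from by
      rw [List.all_eq_true]; intro t ht
      rcases hall t ht with h | h
      · simp [List.getD, h]
      · simp [List.getD] at h; simp [h]]
    rw [hcount, hlen]; decide
  · rw [not_forall] at hall
    simp only [not_forall, not_or, exists_prop] at hall
    obtain ⟨t, ht, htk, htc⟩ := hall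
    have htF : t ∈ F := by
      rw [hF, List.mem_filter]
      exact ⟨ht, by simp [List.getD] at htc ⊢; simp [htc]⟩
    have h2 : 2 ≤ F.length := by
      have hsub : ({t, k} : Finset ℕ) ⊆ F.toFinset := by
        intro x hx
        rcases Finset.mem_insert.mp hx with h | h
        · exact List.mem_toFinset.mpr (h ▸ htF)
        · exact List.mem_toFinset.mpr ((Finset.mem_singleton.mp h) ▸ hkF)
      have hcard2 : ({t, k} : Finset ℕ).card = 2 := by
        rw [Finset.card_insert_of_notMem (by simp [htk]), Finset.card_singleton]
      have := Finset.card_le_card hsub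
      rw [hcard2, List.toFinset_card_of_nodup hnd] at this
      exact this
    have hfalse : ((List.range l.length).all
        (fun t => decide (t = k) || decide ((l.getD t ("", "")).1 ≠ c))) = false := by
      rw [List.all_eq_false]
      exact ⟨t, ht, by simp [List.getD] at htc ⊢; simp [htk, htc]⟩
    rw [hfalse, hcount]
    have hne : F.length ≠ 1 := by omega
    simp [hne]

-- B computes the reference value
lemma pvAlt_eq (pics : List (List (String × String))) :
    delete_static_pics_alt pics = pvSpecList (pics.map pvKV) := by
  unfold delete_static_pics_alt pvSpecList
  set ps := pics.map pvKV with hps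
  rw [show (pics.map (fun p =>
      (((PySem.Dict.mk p).get? "coordinates").getD "", ((PySem.Dict.mk p).get? "pic").getD "")))
    = ps from rfl]
  have hcond : (((PySem.List.enumerate ps 0).filter (fun iv =>
      (PySem.List.pyRange 0 (ps.length : Int) 1).all (fun j =>
        decide (j = iv.1) || decide ((PySem.List.pyGetD ps j ("", "")).1 ≠ iv.2.1)))).map
      (fun iv => iv.2.2))
    = (((PySem.List.enumerate ps 0).filter (fun iv =>
        (ps.map Prod.fst).count iv.2.1 == 1)).map (fun iv => iv.2.2)) := by
    apply congrArg
    apply List.filter_congr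
    intro iv hiv
    obtain ⟨k, hk1, hk2, hk3⟩ := pvMemEnum ps 0 iv hiv
    rw [PySem.List.pyRange_one, List.all_map]
    have hlen0 : ((((ps.length : Int)) - 0).toNat) = ps.length := by simp
    rw [hlen0]
    have hpg : ∀ t : Nat, (PySem.List.pyGetD ps ((0 : Int) + t) ("", "")) = ps.getD t ("", "") := by
      intro t
      rw [show ((0 : Int) + t) = (t : Int) from by omega, PySem.List.pyGetD_natCast]
    have hfun : ((fun j => decide (j = iv.1)
          || decide ((PySem.List.pyGetD ps j ("", "")).1 ≠ iv.2.1)) ∘ fun k : Nat => (0 : Int) + k)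
        = (fun (t : Nat) => (decide (t = k)
          || decide ((ps.getD t ("", "")).1 ≠ (ps.getD k ("", "")).1))) := by
      funext t
      simp only [Function.comp]
      rw [hpg t, hk3, hk1]
      congr 1
      rw [decide_eq_decide]
      omega
    rw [hfun, pvAllIff ps k hk2, hk3]
  rw [hcond]
  exact pvEnumFilter ps 0 (fun q => List.count q.1 (List.map Prod.fst ps) == 1)

-- A computes the reference value
lemma pvA_eq (pics : List (List (String × String))) :
    delete_static_pics pics = pvSpecList (pics.map pvKV) := by
  unfold delete_static_pics
  rw [show (pics.foldl
      (fun (d : PySem.Dict String (List String)) pic =>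
        if d.contains (((PySem.Dict.mk pic).get? "coordinates").getD "") then
          d.modify (((PySem.Dict.mk pic).get? "coordinates").getD "") []
            (fun l => l ++ [((PySem.Dict.mk pic).get? "pic").getD ""])
        else
          d.insert (((PySem.Dict.mk pic).get? "coordinates").getD "")
            [((PySem.Dict.mk pic).get? "pic").getD ""])
      PySem.Dict.empty) = pvGrp (pics.map pvKV) from by
    unfold pvGrp; rw [List.foldl_map]; rfl]
  set ps := pics.map pvKV with hps
  rw [show (fun (acc : List String) (kv : String × List String) =>
        if kv.2.length == 1 then acc ++ kv.2 else acc)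
      = (fun acc kv => acc ++ (if kv.2.length == 1 then kv.2 else [])) from by
    funext acc kv; split <;> simp]
  rw [PySem.List.foldl_append_eq_flatMap, List.nil_append, pvGrp_items, List.flatMap_map]
  have hkey := pvKeyLemma ps (fun _ => 0)
  simp only [Nat.add_zero] at hkey
  rw [pvSpecList, ← hkey]
  apply List.flatMap_congr
  intro k hk
  dsimp only
  rw [show ((ps.filter (fun q => q.1 == k)).map Prod.snd).length
      = (ps.map Prod.fst).count k from by
    simp only [hps, List.length_map, List.count_eq_countP, ← List.countP_eq_length_filter,
      List.countP_map]
    exact List.countP_congr (fun a _ => Iff.rfl)]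

-- ===== VERDICT (by name: the statement is the Claim_ definition above) =====
theorem delete_static_pics_spec : Claim_equal_delete_static_pics := by
  intro pics _ _
  unfold Spec_delete_static_pics
  rw [pvA_eq, pvAlt_eq]
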